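-- pv_equiv track=rewrite | github.com/whuang214/connect-4-engine | agents/rule_based_agent.py | get_center_preferred_order
-- ===== SOURCE A (Python) =====
-- def get_center_preferred_order(cols: int) -> list[int]:
--     """
--     Returns columns ordered by closeness to center.
--     For 7 columns, this gives: [3, 2, 4, 1, 5, 0, 6]
--     """
--     center = cols // 2
--     order = [center]
--
--     for offset in range(1, cols):
--         left = center - offset
--         right = center + offset
--
--         if left >= 0:
--             order.append(left)
--         if right < cols:
--             order.append(right)
--
--     return order
-- ===== SOURCE B (Python) =====
-- def get_center_preferred_order(cols: int) -> list[int]: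
--     """
--     Returns columns ordered by closeness to center.
--     For 7 columns, this gives: [3, 2, 4, 1, 5, 0, 6]
--     """
--     center = cols // 2
--     tail = sorted((c for c in range(cols) if c != center),
--                   key=lambda c: (abs(c - center), c))
--     return [center] + tail
-- ===== Notes on version B (the rewrite author's own statement) =====
-- stated objective: idiomatic
-- what changed: Replaces A's offset loop with its two per-offset bound checks by a single stable sort of the non-center columns keyed by (distance to center, column), with the tie component making left-before-right explicit.
import Mathlib
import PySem

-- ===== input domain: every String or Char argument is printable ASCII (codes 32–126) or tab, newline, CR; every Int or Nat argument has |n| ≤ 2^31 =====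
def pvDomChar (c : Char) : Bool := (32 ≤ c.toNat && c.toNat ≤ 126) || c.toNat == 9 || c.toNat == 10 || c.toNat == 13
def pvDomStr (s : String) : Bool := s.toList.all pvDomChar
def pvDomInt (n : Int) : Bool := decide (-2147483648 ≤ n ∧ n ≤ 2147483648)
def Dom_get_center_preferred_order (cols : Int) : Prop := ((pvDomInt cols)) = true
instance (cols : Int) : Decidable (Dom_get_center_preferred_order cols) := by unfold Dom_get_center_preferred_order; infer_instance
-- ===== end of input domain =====

-- B replaces A's offset loop by a stable sort of the non-center columns keyed by
-- (distance to center, column); same values, not faster.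

-- ===== PORT A =====
def get_center_preferred_order (cols : Int) : List Int :=
  let center := PySem.Int.floordiv cols 2
  (PySem.List.pyRange 1 cols 1).foldl (fun order offset =>
    let left := center - offset
    let right := center + offset
    let order := if left ≥ 0 then order ++ [left] else order
    if right < cols then order ++ [right] else order) [center]

-- ===== PORT B =====
-- Python's abs on an int is ported exactly as Int's |·|.
def get_center_preferred_order_alt (cols : Int) : List Int :=
  let center := PySem.Int.floordiv cols 2
  let tail := PySem.List.sorted2
    ((PySem.List.pyRange 0 cols 1).filter (fun c => c != center))
    (fun c => |c - center|) (fun c => c)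
  [center] ++ tail

-- ===== PRECONDITION & SPEC =====
def Spec_get_center_preferred_order (cols : Int) (out : List Int) : Prop := out = get_center_preferred_order_alt cols
instance (cols : Int) (out : List Int) : Decidable (Spec_get_center_preferred_order cols out) := by unfold Spec_get_center_preferred_order; infer_instance

-- ===== CLAIM (what is proved, stated in full; the proofs are below) =====
def Claim_equal_get_center_preferred_order : Prop := ∀ (cols : Int), Dom_get_center_preferred_order cols → Spec_get_center_preferred_order cols (get_center_preferred_order cols)

-- ===== LEMMAS AND PROOFS =====

-- the per-offset contribution of A's loop body
def gcpoStep (center cols off : Int) : List Int :=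
  (if 0 ≤ center - off then [center - off] else []) ++
  (if center + off < cols then [center + off] else [])

-- the strict lexicographic order realised by sorted2 with keys (k1, id)
def gcpoR (k1 : Int → Int) (a b : Int) : Prop := k1 a < k1 b ∨ (k1 a = k1 b ∧ a < b)

theorem gcpoR_trans (k1 : Int → Int) (a b c : Int) (h1 : gcpoR k1 a b) (h2 : gcpoR k1 b c) : gcpoR k1 a c := by
  unfold gcpoR at *; omega

theorem gcpoR_ne (k1 : Int → Int) (a b : Int) (h : gcpoR k1 a b) : a ≠ b := by
  unfold gcpoR at h; intro he; subst he; omega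

theorem gcpoR_total (k1 : Int → Int) (a b : Int) (h : a ≠ b) : gcpoR k1 a b ∨ gcpoR k1 b a := by
  unfold gcpoR; omega

theorem gcpo_before_iff (k1 : Int → Int) (a b : Int) :
    ((decide (k1 a < k1 b) || !decide (k1 b < k1 a) && decide (a < b)) = true) ↔ gcpoR k1 a b := by
  unfold gcpoR; simp; omega

theorem gcpo_insertBy_perm {α : Type} (before : α → α → Bool) (x : α) (l : List α) :
    (PySem.List.insertBy before x l).Perm (x :: l) := by
  induction l with
  | nil => simp [PySem.List.insertBy]
  | cons y ys ih =>
    simp only [PySem.List.insertBy]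
    by_cases h : before x y = true
    · simp [h]
    · rw [if_neg h]
      exact ((ih.cons y).trans (List.Perm.swap x y ys)).symm.symm

theorem gcpo_insertBy_pairwise {α : Type} (before : α → α → Bool)
    (htrans : ∀ a b c, before a b = true → before b c = true → before a c = true)
    (htot : ∀ a b, a ≠ b → before a b = true ∨ before b a = true)
    (x : α) (l : List α)
    (hl : l.Pairwise (fun a b => before a b = true)) (hx : x ∉ l) :
    (PySem.List.insertBy before x l).Pairwise (fun a b => before a b = true) := by
  induction l with
  | nil => simp [PySem.List.insertBy]
  | cons y ys ih =>
    rcases List.pairwise_cons.mp hl with ⟨hy, hys⟩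
    simp only [PySem.List.insertBy]
    by_cases h : before x y = true
    · rw [if_pos h]
      refine List.pairwise_cons.mpr ⟨?_, hl⟩
      intro z hz
      rcases List.mem_cons.mp hz with hz | hz
      · exact hz ▸ h
      · exact htrans x y z h (hy z hz)
    · rw [if_neg h]
      have hx' : x ∉ ys := fun hm => hx (List.mem_cons_of_mem y hm)
      refine List.pairwise_cons.mpr ⟨?_, ih hys hx'⟩
      intro z hz
      rcases (PySem.List.mem_insertBy before x z ys).mp hz with hz | hz
      · subst hz
        rcases htot z y (fun he => hx (he ▸ List.mem_cons_self)) with h' | h'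
        · exact absurd h' h
        · exact h'
      · exact hy z hz

theorem gcpo_foldl_perm {α : Type} (before : α → α → Bool) (xs acc : List α) :
    (xs.foldl (fun acc x => PySem.List.insertBy before x acc) acc).Perm (acc ++ xs) := by
  induction xs generalizing acc with
  | nil => simp
  | cons x xs ih =>
    simp only [List.foldl_cons]
    refine (ih (PySem.List.insertBy before x acc)).trans ?_
    refine ((gcpo_insertBy_perm before x acc).append_right xs).trans ?_
    exact List.perm_middle.symm

theorem gcpo_foldl_pairwise {α : Type} (before : α → α → Bool)
    (htrans : ∀ a b c, before a b = true → before b c = true → before a c = true)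
    (htot : ∀ a b, a ≠ b → before a b = true ∨ before b a = true)
    (xs acc : List α)
    (hacc : acc.Pairwise (fun a b => before a b = true))
    (hdisj : ∀ x ∈ xs, x ∉ acc) (hnd : xs.Nodup) :
    (xs.foldl (fun acc x => PySem.List.insertBy before x acc) acc).Pairwise (fun a b => before a b = true) := by
  induction xs generalizing acc with
  | nil => simpa using hacc
  | cons x xs ih =>
    simp only [List.foldl_cons]
    rcases List.nodup_cons.mp hnd with ⟨hxn, hnd'⟩
    refine ih (PySem.List.insertBy before x acc)
      (gcpo_insertBy_pairwise before htrans htot x acc hacc (hdisj x List.mem_cons_self)) ?_ hnd'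
    intro z hz hmem
    rcases (PySem.List.mem_insertBy before x z acc).mp hmem with h | h
    · exact hxn (h ▸ hz)
    · exact hdisj z (List.mem_cons_of_mem x hz) h

-- the sorted2 order is determined: any strictly (k1, id)-lex increasing rearrangement IS the sort
theorem gcpo_sorted2_eq (xs ys : List Int) (k1 : Int → Int)
    (hperm : ys.Perm xs) (hys : ys.Pairwise (gcpoR k1)) :
    PySem.List.sorted2 xs k1 (fun c => c) = ys := by
  have hbefore : ∀ a b : Int,
      ((decide (k1 a < k1 b) || !decide (k1 b < k1 a) && decide (a < b)) = true) ↔ gcpoR k1 a b :=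
    gcpo_before_iff k1
  set before : Int → Int → Bool :=
    fun a b => decide (k1 a < k1 b) || !decide (k1 b < k1 a) && decide (a < b) with hbdef
  have hxs_eq : PySem.List.sorted2 xs k1 (fun c => c) false =
      xs.foldl (fun acc x => PySem.List.insertBy before x acc) [] := rfl
  have htrans : ∀ a b c, before a b = true → before b c = true → before a c = true := by
    intro a b c h1 h2
    exact (hbefore a c).mpr (gcpoR_trans k1 a b c ((hbefore a b).mp h1) ((hbefore b c).mp h2))
  have htot : ∀ a b : Int, a ≠ b → before a b = true ∨ before b a = true := by
    intro a b h
    rcases gcpoR_total k1 a b h with h' | h'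
    · exact Or.inl ((hbefore a b).mpr h')
    · exact Or.inr ((hbefore b a).mpr h')
  have hnd : xs.Nodup := hperm.nodup_iff.mp (hys.imp (fun {a b} h => gcpoR_ne k1 a b h))
  have hperm' : (xs.foldl (fun acc x => PySem.List.insertBy before x acc) []).Perm xs := by
    simpa using gcpo_foldl_perm before xs []
  have hpw : (xs.foldl (fun acc x => PySem.List.insertBy before x acc) []).Pairwise
      (fun a b => before a b = true) :=
    gcpo_foldl_pairwise before htrans htot xs [] (by simp) (by simp) hnd
  rw [hxs_eq]
  refine List.eq_of_perm_of_sorted ?_ (hpw.imp fun {a b} h => (hbefore a b).mp h) hys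
    (hperm'.trans hperm.symm)
  intro a b _ _ h1 h2
  exact (gcpoR_ne k1 a a (gcpoR_trans k1 a b a h1 h2) rfl).elim

-- floor division by 2, in omega-friendly form
theorem gcpo_center_bounds (cols : Int) :
    2 * PySem.Int.floordiv cols 2 ≤ cols ∧ cols < 2 * PySem.Int.floordiv cols 2 + 2 := by
  have h := PySem.Int.floordiv_eq_ediv_of_pos (a := cols) (b := 2) (by norm_num)
  rw [h]; omega

-- membership in a per-offset block
theorem gcpo_mem_step (center cols off x : Int) :
    x ∈ gcpoStep center cols off ↔
      (0 ≤ center - off ∧ x = center - off) ∨ (center + off < cols ∧ x = center + off) := by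
  unfold gcpoStep
  split_ifs <;> simp_all

-- the key of every element contributed at a given offset is that offset
theorem gcpo_key (center cols off x : Int) (hoff : 1 ≤ off) (hm : x ∈ gcpoStep center cols off) :
    |x - center| = off := by
  rcases (gcpo_mem_step center cols off x).mp hm with ⟨_, hx⟩ | ⟨_, hx⟩ <;> subst hx
  · rw [show center - off - center = -off by ring, abs_neg]; exact abs_of_nonneg (by omega)
  · rw [show center + off - center = off by ring]; exact abs_of_nonneg (by omega)

-- A's loop result as a flatMap of per-offset blocks
theorem gcpo_A_eq_flatMap (cols : Int) :
    get_center_preferred_order cols =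
      PySem.Int.floordiv cols 2 ::
        (PySem.List.pyRange 1 cols 1).flatMap (gcpoStep (PySem.Int.floordiv cols 2) cols) := by
  unfold get_center_preferred_order
  rw [PySem.List.foldl_congr_mem
    (g := fun (acc : List Int) (off : Int) => acc ++ gcpoStep (PySem.Int.floordiv cols 2) cols off)]
  · rw [PySem.List.foldl_append_eq_flatMap]; rfl
  · intro acc off _
    unfold gcpoStep
    simp only [ge_iff_le]
    split_ifs with h1 h2 h2 <;> simp [List.append_assoc]

-- the flatMap tail is strictly (distance, id)-lex increasing
theorem gcpo_tail_pairwise (center cols : Int) :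
    ((PySem.List.pyRange 1 cols 1).flatMap (gcpoStep center cols)).Pairwise
      (gcpoR (fun c => |c - center|)) := by
  rw [List.pairwise_flatMap]
  constructor
  · intro off hoff
    have hoff1 : 1 ≤ off := ((PySem.List.mem_pyRange_one).mp hoff).1
    unfold gcpoStep
    split_ifs with h1 h2 h2
    · refine List.pairwise_append.mpr ⟨by simp, by simp, ?_⟩
      intro a ha b hb
      rw [List.mem_singleton.mp ha, List.mem_singleton.mp hb]
      right
      refine ⟨?_, by omega⟩
      show |center - off - center| = |center + off - center|
      rw [show center - off - center = -off by ring, show center + off - center = off by ring, abs_neg]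
    · simp
    · simp
    · simp
  · refine (PySem.List.pairwise_lt_pyRange_one 1 cols).imp_of_mem ?_
    intro o1 o2 h1 h2 hlt x hx y hy
    have ho1 : 1 ≤ o1 := ((PySem.List.mem_pyRange_one).mp h1).1
    have ho2 : 1 ≤ o2 := ((PySem.List.mem_pyRange_one).mp h2).1
    left
    show |x - center| < |y - center|
    rw [gcpo_key center cols o1 x ho1 hx, gcpo_key center cols o2 y ho2 hy]
    exact hlt

-- the flatMap tail is a rearrangement of the filtered range
theorem gcpo_tail_perm (center cols : Int)
    (hb : 2 * center ≤ cols ∧ cols < 2 * center + 2) :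
    ((PySem.List.pyRange 1 cols 1).flatMap (gcpoStep center cols)).Perm
      ((PySem.List.pyRange 0 cols 1).filter (fun c => c != center)) := by
  have hnd1 : ((PySem.List.pyRange 1 cols 1).flatMap (gcpoStep center cols)).Nodup :=
    (gcpo_tail_pairwise center cols).imp (fun {a b} h => gcpoR_ne _ a b h)
  have hnd2 : ((PySem.List.pyRange 0 cols 1).filter (fun c => c != center)).Nodup :=
    (PySem.List.nodup_pyRange_one 0 cols).filter _
  rw [List.perm_ext_iff_of_nodup hnd1 hnd2]
  intro x
  rw [List.mem_flatMap, List.mem_filter]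
  constructor
  · rintro ⟨off, hoffmem, hm⟩
    obtain ⟨hl, hr⟩ := (PySem.List.mem_pyRange_one).mp hoffmem
    rcases (gcpo_mem_step center cols off x).mp hm with ⟨h1, hx⟩ | ⟨h1, hx⟩ <;> subst hx <;>
      refine ⟨(PySem.List.mem_pyRange_one).mpr ⟨by omega, by omega⟩, by simp; omega⟩
  · rintro ⟨hmem, hne⟩
    obtain ⟨h0, hlt⟩ := (PySem.List.mem_pyRange_one).mp hmem
    have hne' : x ≠ center := by simpa using hne
    by_cases hcase : x < center
    · refine ⟨center - x, (PySem.List.mem_pyRange_one).mpr ⟨by omega, by omega⟩, ?_⟩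
      rw [gcpo_mem_step]; left; exact ⟨by omega, by omega⟩
    · refine ⟨x - center, (PySem.List.mem_pyRange_one).mpr ⟨by omega, by omega⟩, ?_⟩
      rw [gcpo_mem_step]; right; exact ⟨by omega, by omega⟩

-- ===== VERDICT (by name: the statement is the Claim_ definition above) =====
theorem get_center_preferred_order_spec : Claim_equal_get_center_preferred_order := by
  intro cols _
  unfold Spec_get_center_preferred_order
  rw [gcpo_A_eq_flatMap]
  show PySem.Int.floordiv cols 2 ::
      (PySem.List.pyRange 1 cols 1).flatMap (gcpoStep (PySem.Int.floordiv cols 2) cols) =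
    [PySem.Int.floordiv cols 2] ++
      PySem.List.sorted2
        ((PySem.List.pyRange 0 cols 1).filter (fun c => c != PySem.Int.floordiv cols 2))
        (fun c => |c - PySem.Int.floordiv cols 2|) (fun c => c)
  rw [gcpo_sorted2_eq _ _ _ (gcpo_tail_perm _ cols (gcpo_center_bounds cols))
    (gcpo_tail_pairwise (PySem.Int.floordiv cols 2) cols)]
  rfl
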